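-- pv_equiv track=rewrite | github.com/Jekell1/AskOTIS | recover_paragraphs.py | compute_end_lines
-- ===== SOURCE A (Python) =====
-- from typing import List, Dict, Tuple
--
-- def compute_end_lines(label_positions: List[Tuple[str,int]], total_lines: int) -> Dict[str, Tuple[int,int]]:
--     spans={}
--     for idx,(name,start) in enumerate(label_positions):
--         end = total_lines
--         if idx+1 < len(label_positions):
--             end = label_positions[idx+1][1]-1
--         spans[name]=(start,end)
--     return spans
-- ===== SOURCE B (Python) =====
-- def compute_end_lines(label_positions, total_lines):
--     entries = []
--     bound = total_lines
--     for name, start in reversed(label_positions):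
--         entries.append((name, (start, bound)))
--         bound = start - 1
--     return dict(reversed(entries))
-- ===== Notes on version B (the rewrite author's own statement) =====
-- stated objective: alternative
-- what changed: A's forward loop with an index lookahead (label_positions[idx+1]) is replaced by a backward pass that carries a running boundary accumulator (bound = previous start - 1), collecting entries in reverse and building the dict from dict(reversed(entries)) so duplicate names overwrite in A's forward order.
import Mathlib
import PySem

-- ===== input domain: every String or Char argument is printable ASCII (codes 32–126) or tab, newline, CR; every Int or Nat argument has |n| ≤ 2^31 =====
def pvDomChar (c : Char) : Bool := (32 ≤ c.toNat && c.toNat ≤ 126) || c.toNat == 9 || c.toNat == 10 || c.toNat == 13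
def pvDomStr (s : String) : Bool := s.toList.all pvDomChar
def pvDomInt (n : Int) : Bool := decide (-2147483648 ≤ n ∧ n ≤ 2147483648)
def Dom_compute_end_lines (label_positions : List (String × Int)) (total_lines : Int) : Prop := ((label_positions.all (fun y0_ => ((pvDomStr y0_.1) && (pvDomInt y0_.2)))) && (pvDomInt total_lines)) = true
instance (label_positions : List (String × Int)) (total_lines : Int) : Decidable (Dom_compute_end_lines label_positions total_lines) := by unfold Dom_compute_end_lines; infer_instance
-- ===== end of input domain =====

-- B replaces A's forward index-lookahead loop by a backward pass with a running boundary accumulator, then dict(reversed(entries)); objective: alternative decomposition, same cost.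


-- ===== PORT A =====
-- for idx,(name,start) in enumerate(...): end = total_lines; if idx+1 < len: end = lp[idx+1][1]-1; spans[name]=(start,end)
def compute_end_lines (label_positions : List (String × Int)) (total_lines : Int) : List (String × Int × Int) :=
  ((PySem.List.enumerate label_positions 0).foldl
    (fun (spans : PySem.Dict String (Int × Int)) p =>
      let e : Int :=
        if p.1 + 1 < (label_positions.length : Int) then
          (PySem.List.pyGetD label_positions (p.1 + 1) ("", 0)).2 - 1
        else total_lines
      spans.insert p.2.1 (p.2.2, e))
    PySem.Dict.empty).items

-- ===== PORT B =====
-- entries=[]; bound=total_lines; for name,start in reversed(lp): entries.append((name,(start,bound))); bound=start-1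
-- return dict(reversed(entries))
def compute_end_lines_alt (label_positions : List (String × Int)) (total_lines : Int) : List (String × Int × Int) :=
  let st := label_positions.reverse.foldl
    (fun (st : List (String × Int × Int) × Int) q =>
      (st.1 ++ [(q.1, q.2, st.2)], q.2 - 1))
    ([], total_lines)
  ((st.1.reverse).foldl
    (fun (d : PySem.Dict String (Int × Int)) e => d.insert e.1 e.2)
    PySem.Dict.empty).items

-- ===== PRECONDITION & SPEC =====
def Spec_compute_end_lines (label_positions : List (String × Int)) (total_lines : Int) (out : List (String × Int × Int)) : Prop := out = compute_end_lines_alt label_positions total_lines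
instance (label_positions : List (String × Int)) (total_lines : Int) (out : List (String × Int × Int)) : Decidable (Spec_compute_end_lines label_positions total_lines out) := by unfold Spec_compute_end_lines; infer_instance

-- ===== CLAIM (what is proved, stated in full; the proofs are below) =====
def Claim_equal_compute_end_lines : Prop := ∀ (label_positions : List (String × Int)) (total_lines : Int), Dom_compute_end_lines label_positions total_lines → Spec_compute_end_lines label_positions total_lines (compute_end_lines label_positions total_lines)

-- ===== LEMMAS AND PROOFS =====

-- canonical (name,start,end) triples, recursively: end = next start - 1, last end = total
def pvSpans (lp : List (String × Int)) (tl : Int) : List (String × Int × Int) :=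
  match lp with
  | [] => []
  | [x] => [(x.1, x.2, tl)]
  | x :: y :: rest => (x.1, x.2, y.2 - 1) :: pvSpans (y :: rest) tl

def pvBound (lp : List (String × Int)) (tl : Int) : Int :=
  match lp with
  | [] => tl
  | x :: _ => x.2 - 1

-- A's enumerate/look-ahead fold over a suffix of L equals the insert-fold over pvSpans of that suffix
lemma pvA_fold_eq (L : List (String × Int)) (tl : Int) :
    ∀ (lp : List (String × Int)) (k : Nat) (d : PySem.Dict String (Int × Int)),
    L.drop k = lp →
    (PySem.List.enumerate lp (k : Int)).foldl
      (fun (spans : PySem.Dict String (Int × Int)) p =>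
        let e : Int :=
          if p.1 + 1 < (L.length : Int) then
            (PySem.List.pyGetD L (p.1 + 1) ("", 0)).2 - 1
          else tl
        spans.insert p.2.1 (p.2.2, e))
      d
    = (pvSpans lp tl).foldl
        (fun (d : PySem.Dict String (Int × Int)) e => d.insert e.1 e.2) d := by
  intro lp
  induction lp with
  | nil => intro k d h; simp [pvSpans]
  | cons x rest ih =>
    intro k d h
    have hk : k < L.length := by
      by_contra hge
      have : L.drop k = [] := List.drop_eq_nil_of_le (by omega)
      simp [this] at h
    have hlen : L.length = k + 1 + rest.length := by
      have := congrArg List.length h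
      simp at this
      omega
    rw [PySem.List.enumerate_cons]
    simp only [List.foldl_cons]
    cases rest with
    | nil =>
      have hcond : ¬ ((k : Int) + 1 < (L.length : Int)) := by
        simp at hlen; omega
      simp [pvSpans, hcond]
    | cons y rest' =>
      have hcond : (k : Int) + 1 < (L.length : Int) := by
        rw [hlen]; push_cast [List.length_cons]; omega
      have hdrop : L.drop (k + 1) = y :: rest' := by
        have : L.drop (k + 1) = (L.drop k).drop 1 := by rw [List.drop_drop]
        rw [this, h]; rfl
      have hget : PySem.List.pyGetD L ((k : Int) + 1) ("", 0) = y := by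
        have h1 : ((k : Int) + 1) = ((k + 1 : Nat) : Int) := by push_cast; ring
        rw [h1, PySem.List.pyGetD_natCast]
        have h0 : (L.drop (k+1))[0]? = some y := by rw [hdrop]; rfl
        rw [List.getElem?_drop] at h0
        simp only [Nat.add_zero] at h0
        simp [List.getD, h0]
      have hrec := ih (k + 1) (d.insert x.1 (x.2, y.2 - 1)) hdrop
      simp only [pvSpans, List.foldl_cons]
      simp only [hcond, if_pos, hget]
      have : ((k : Nat) : Int) + 1 = ((k + 1 : Nat) : Int) := by push_cast; ring
      rw [this, hrec]

-- B's backward build yields exactly pvSpans reversed, with the running bound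
lemma pvB_build (tl : Int) :
    ∀ (lp : List (String × Int)),
    lp.reverse.foldl
      (fun (st : List (String × Int × Int) × Int) q =>
        (st.1 ++ [(q.1, q.2, st.2)], q.2 - 1))
      ([], tl)
    = ((pvSpans lp tl).reverse, pvBound lp tl) := by
  intro lp
  induction lp with
  | nil => simp [pvSpans, pvBound]
  | cons x rest ih =>
    rw [List.reverse_cons, List.foldl_append, ih]
    cases rest with
    | nil => simp [pvSpans, pvBound]
    | cons y rest' => simp [pvSpans, pvBound]

-- ===== VERDICT (by name: the statement is the Claim_ definition above) =====
theorem compute_end_lines_spec : Claim_equal_compute_end_lines := by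
  intro lp tl _
  unfold Spec_compute_end_lines compute_end_lines compute_end_lines_alt
  have hA := pvA_fold_eq lp tl lp 0 PySem.Dict.empty (by simp)
  simp only [Nat.cast_zero] at hA
  rw [hA, pvB_build tl lp]
  simp
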